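-- pv_equiv track=rewrite | github.com/csdusunlight/dragon | wafuli_admin/management/commands/20180110.py | level_compute
-- ===== SOURCE A (Python) =====
-- def level_compute(amount, level):
--     if level == 0:
--         if amount >= 100000:
--             amount -= 100000
--             level += 1
--             amount, level = level_compute(amount, level)
--     elif level == 1:
--         if amount >= 500000:
--             amount -= 500000
--             level += 1
--             amount, level = level_compute(amount, level)
--     elif level >=2:
--         if amount >= 1000000:
--             m = int(amount/1000000)
--             amount -= 1000000 * m
--             level += m
--     return amount, level
-- ===== SOURCE B (Python) =====
-- def level_compute(amount, level):
--     table = {0: 100000, 1: 500000}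
--     while level in table and amount >= table[level]:
--         amount -= table[level]
--         level += 1
--     if level >= 2 and amount >= 1000000:
--         amount, level = amount % 1000000, level + amount // 1000000
--     return amount, level
-- ===== Notes on version B (the rewrite author's own statement) =====
-- stated objective: simpler
-- what changed: Replaces the three-branch tail-recursion cascade with a table-driven while loop over a threshold dict plus a single divmod step for the terminal level; int(amount/1000000) becomes exact integer floor division (equal on the |amount| <= 2^31 domain).
import Mathlib
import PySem

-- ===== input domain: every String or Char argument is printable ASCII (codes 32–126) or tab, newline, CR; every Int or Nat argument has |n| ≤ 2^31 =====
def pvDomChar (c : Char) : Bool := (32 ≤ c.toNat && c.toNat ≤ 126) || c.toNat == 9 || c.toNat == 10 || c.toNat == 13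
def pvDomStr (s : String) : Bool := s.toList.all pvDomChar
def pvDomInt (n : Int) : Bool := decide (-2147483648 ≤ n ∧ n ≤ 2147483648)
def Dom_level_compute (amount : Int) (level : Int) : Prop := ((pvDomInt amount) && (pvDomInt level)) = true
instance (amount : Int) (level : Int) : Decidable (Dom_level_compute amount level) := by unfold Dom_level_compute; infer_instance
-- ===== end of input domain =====

-- B replaces A's tail-recursion cascade with a table-driven while loop plus one divmod step (objective: simpler).
-- ===== PORT A =====
-- int(amount/1000000) is ported as floor division: exact on the |amount| ≤ 2^31 domain (float division is
-- exact-enough there and the operand is positive in that branch).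
def level_compute (amount : Int) (level : Int) : Int × Int :=
  if level = 0 then
    if amount ≥ 100000 then level_compute (amount - 100000) (level + 1)
    else (amount, level)
  else if level = 1 then
    if amount ≥ 500000 then level_compute (amount - 500000) (level + 1)
    else (amount, level)
  else if level ≥ 2 then
    if amount ≥ 1000000 then
      let m := PySem.Int.floordiv amount 1000000
      (amount - 1000000 * m, level + m)
    else (amount, level)
  else (amount, level)
termination_by (2 - level).toNat
decreasing_by all_goals omega

-- ===== PORT B =====
def lcTable : PySem.Dict Int Int := PySem.Dict.ofList [(0, 100000), (1, 500000)]

theorem lcTable_get (l : Int) :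
    lcTable.get? l = if l = 1 then some 500000 else if l = 0 then some 100000 else none := by
  have e : lcTable = (PySem.Dict.empty.insert 0 100000).insert 1 500000 := by decide
  rw [e]
  simp [PySem.Dict.get?_insert, PySem.Dict.get?_empty]

-- fact the loop's termination cites: the table only contains keys < 2
theorem lcTable_key_lt (l t : Int) (h : lcTable.get? l = some t) : l < 2 := by
  rw [lcTable_get] at h
  split_ifs at h <;> omega

-- the while loop of B
def lcLoop (amount : Int) (level : Int) : Int × Int :=
  match h : lcTable.get? level with
  | some t =>
      if amount ≥ t then lcLoop (amount - t) (level + 1) else (amount, level)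
  | none => (amount, level)
termination_by (2 - level).toNat
decreasing_by have := lcTable_key_lt level t h; omega

def level_compute_alt (amount : Int) (level : Int) : Int × Int :=
  let (a, l) := lcLoop amount level
  if l ≥ 2 ∧ a ≥ 1000000 then
    (PySem.Int.mod a 1000000, l + PySem.Int.floordiv a 1000000)
  else (a, l)

-- ===== PRECONDITION & SPEC =====
def Spec_level_compute (amount : Int) (level : Int) (out : Int × Int) : Prop := out = level_compute_alt amount level
instance (amount : Int) (level : Int) (out : Int × Int) : Decidable (Spec_level_compute amount level out) := by unfold Spec_level_compute; infer_instance

-- ===== CLAIM (what is proved, stated in full; the proofs are below) =====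
def Claim_equal_level_compute : Prop := ∀ (amount : Int) (level : Int), Dom_level_compute amount level → Spec_level_compute amount level (level_compute amount level)

-- ===== LEMMAS AND PROOFS =====

theorem lcLoop_stop (amount l : Int) (h0 : l ≠ 0) (h1 : l ≠ 1) :
    lcLoop amount l = (amount, l) := by
  rw [lcLoop]
  split
  · rename_i t heq
    rw [lcTable_get] at heq
    simp [h0, h1] at heq
  · rfl

theorem lcLoop0 (amount : Int) :
    lcLoop amount 0 = if amount ≥ 100000 then lcLoop (amount - 100000) 1 else (amount, 0) := by
  rw [lcLoop]
  split
  · rename_i t heq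
    rw [lcTable_get] at heq
    norm_num at heq
    subst heq
    rfl
  · rename_i heq
    rw [lcTable_get] at heq
    simp at heq

theorem lcLoop1 (amount : Int) :
    lcLoop amount 1 = if amount ≥ 500000 then lcLoop (amount - 500000) 2 else (amount, 1) := by
  rw [lcLoop]
  split
  · rename_i t heq
    rw [lcTable_get] at heq
    norm_num at heq
    subst heq
    rfl
  · rename_i heq
    rw [lcTable_get] at heq
    simp at heq

-- the terminal (level ≥ 2) step of A agrees with B's divmod step
theorem term_step (a l : Int) (hl : l ≥ 2) :
    (if a ≥ 1000000 then
      (a - 1000000 * PySem.Int.floordiv a 1000000, l + PySem.Int.floordiv a 1000000)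
     else (a, l))
    = (if l ≥ 2 ∧ a ≥ 1000000 then
        (PySem.Int.mod a 1000000, l + PySem.Int.floordiv a 1000000)
       else (a, l)) := by
  simp only [PySem.Int.floordiv, PySem.Int.mod, hl, true_and]
  split_ifs with h
  · have hm := Int.fmod_add_mul_fdiv a 1000000
    have : a - 1000000 * a.fdiv 1000000 = a.fmod 1000000 := by omega
    rw [this]
  · rfl

theorem level_compute_ge2 (a l : Int) (hl : l ≥ 2) :
    level_compute a l = level_compute_alt a l := by
  have h0 : l ≠ 0 := by omega
  have h1 : l ≠ 1 := by omega
  rw [level_compute]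
  simp only [h0, h1, if_false, hl, if_true]
  rw [level_compute_alt, lcLoop_stop a l h0 h1]
  exact term_step a l hl

theorem level_compute_eq1 (a : Int) :
    level_compute a 1 = level_compute_alt a 1 := by
  rw [level_compute]
  simp only [show (1:Int) ≠ 0 by omega, if_false, if_true]
  by_cases h : a ≥ 500000
  · simp only [h, if_true]
    have e2 : (1:Int) + 1 = 2 := by norm_num
    rw [e2, level_compute_ge2 (a - 500000) 2 (by omega)]
    rw [level_compute_alt, level_compute_alt, lcLoop1, lcLoop_stop (a - 500000) 2 (by omega) (by omega)]
    simp [h]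
  · simp only [h, if_false]
    rw [level_compute_alt, lcLoop1]
    simp [h]

theorem level_compute_spec : Claim_equal_level_compute := by
  unfold Claim_equal_level_compute Spec_level_compute
  intro a l _
  by_cases h0 : l = 0
  · subst h0
    rw [level_compute]
    simp only [if_true]
    by_cases h : a ≥ 100000
    · simp only [h, if_true]
      have e1 : (0:Int) + 1 = 1 := by norm_num
      rw [e1, level_compute_eq1 (a - 100000)]
      rw [level_compute_alt, level_compute_alt, lcLoop0]
      simp [h]
    · simp only [h, if_false]
      rw [level_compute_alt, lcLoop0]
      simp [h]
  · by_cases h1 : l = 1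
    · subst h1; exact level_compute_eq1 a
    · by_cases h2 : l ≥ 2
      · exact level_compute_ge2 a l h2
      · rw [level_compute]
        simp only [h0, h1, h2, if_false]
        rw [level_compute_alt, lcLoop_stop a l h0 h1]
        simp [h2]
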